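-- pv_equiv track=rewrite | github.com/re-syz/1072py | HW3/3073.py | return2num
-- ===== SOURCE A (Python) =====
-- def return2num(n=0):
--     n1 = 1
--     n2 = 0
--     cur1 = 0
--     cur2 = 0
--
--     for i in range(n):
--         cur1 += 1
--         n1 *= cur1
--
--     for i in range(n):
--         cur2 += 1
--         n2 += cur2
--
--     return (n1, n2)
-- ===== SOURCE B (Python) =====
-- def return2num(n=0):
--     # factorial via a countdown product; sum via the closed form n*(n+1)//2
--     f = 1
--     k = n
--     while k > 0:
--         f *= k
--         k -= 1
--     s = n * (n + 1) // 2 if n > 0 else 0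
--     return (f, s)
-- ===== Notes on version B (the rewrite author's own statement) =====
-- stated objective: simpler
-- what changed: The second summation loop is replaced by the closed form n*(n+1)//2 (0 for n<=0), and the factorial is computed by a countdown product over n..1 instead of an up-counting loop with two auxiliary counters.
import Mathlib
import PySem

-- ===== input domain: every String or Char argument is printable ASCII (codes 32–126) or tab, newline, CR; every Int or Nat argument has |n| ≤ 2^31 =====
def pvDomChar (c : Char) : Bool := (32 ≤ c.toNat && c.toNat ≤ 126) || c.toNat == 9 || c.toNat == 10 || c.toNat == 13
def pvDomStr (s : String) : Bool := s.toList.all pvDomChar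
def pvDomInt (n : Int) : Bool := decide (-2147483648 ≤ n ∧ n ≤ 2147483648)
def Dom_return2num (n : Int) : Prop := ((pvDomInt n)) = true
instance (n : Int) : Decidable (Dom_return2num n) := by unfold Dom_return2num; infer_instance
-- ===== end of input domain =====

-- B replaces the summation loop with the closed form n*(n+1)//2 (0 for n ≤ 0) and
-- computes the factorial by a countdown product; objective: simpler.

-- ===== PORT A =====
def return2num (n : Int) : Int × Int :=
  let s1 := (PySem.List.pyRange 0 n 1).foldl
      (fun (p : Int × Int) _ => (p.1 * (p.2 + 1), p.2 + 1)) (1, 0)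
  let s2 := (PySem.List.pyRange 0 n 1).foldl
      (fun (p : Int × Int) _ => (p.1 + (p.2 + 1), p.2 + 1)) (0, 0)
  (s1.1, s2.1)

-- ===== PORT B =====
-- the 'while k > 0: f *= k; k -= 1' loop of Source B, as structural recursion on k.toNat
def bFact (f k : Int) : Int :=
  if h : 0 < k then bFact (f * k) (k - 1) else f
termination_by k.toNat
decreasing_by omega

def return2num_alt (n : Int) : Int × Int :=
  (bFact 1 n, if 0 < n then PySem.Int.floordiv (n * (n + 1)) 2 else 0)

-- ===== PRECONDITION & SPEC =====
def Spec_return2num (n : Int) (out : Int × Int) : Prop := out = return2num_alt n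
instance (n : Int) (out : Int × Int) : Decidable (Spec_return2num n out) := by unfold Spec_return2num; infer_instance

-- ===== CLAIM (what is proved, stated in full; the proofs are below) =====
def Claim_equal_return2num : Prop := ∀ (n : Int), Dom_return2num n → Spec_return2num n (return2num n)

-- ===== LEMMAS AND PROOFS =====

lemma fold1_fact (m : Nat) :
    (PySem.List.pyRange 0 m 1).foldl
      (fun (p : Int × Int) _ => (p.1 * (p.2 + 1), p.2 + 1)) (1, 0)
      = ((m.factorial : Int), (m : Int)) := by
  induction m with
  | zero => simp [PySem.List.pyRange_one_eq_nil]
  | succ k ih =>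
      have h : ((k : Int) + 1) = ((k + 1 : Nat) : Int) := by push_cast; ring
      rw [show ((k + 1 : Nat) : Int) = (k : Int) + 1 by push_cast; ring,
        PySem.List.pyRange_one_succ_right (by positivity), List.foldl_append, ih]
      simp [Nat.factorial_succ]
      ring

lemma fold2_sum (m : Nat) :
    (PySem.List.pyRange 0 m 1).foldl
      (fun (p : Int × Int) _ => (p.1 + (p.2 + 1), p.2 + 1)) (0, 0)
      = (((m * (m + 1) / 2 : Nat) : Int), (m : Int)) := by
  induction m with
  | zero => simp [PySem.List.pyRange_one_eq_nil]
  | succ k ih =>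
      rw [show ((k + 1 : Nat) : Int) = (k : Int) + 1 by push_cast; ring,
        PySem.List.pyRange_one_succ_right (by positivity), List.foldl_append, ih]
      have hd : 2 ∣ k * (k + 1) := (Nat.even_mul_succ_self k).two_dvd
      have h2 : (k + 1) * (k + 1 + 1) / 2 = k * (k + 1) / 2 + (k + 1) := by
        have h1 : (k + 1) * (k + 1 + 1) = k * (k + 1) + 2 * (k + 1) := by ring
        omega
      simp [h2]

lemma bFact_eq (m : Nat) : ∀ (a : Int), bFact a m = a * (m.factorial : Int) := by
  induction m with
  | zero => intro a; rw [bFact]; simp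
  | succ k ih =>
      intro a
      rw [bFact]
      have hpos : (0 : Int) < ((k + 1 : Nat) : Int) := by positivity
      rw [dif_pos hpos]
      have hk : ((k + 1 : Nat) : Int) - 1 = (k : Int) := by push_cast; ring
      rw [hk, ih]
      simp [Nat.factorial_succ]
      ring

lemma bFact_nonpos {k : Int} (h : ¬ 0 < k) (a : Int) : bFact a k = a := by
  rw [bFact, dif_neg h]

-- ===== VERDICT (by name: the statement is the Claim_ definition above) =====
theorem return2num_spec : Claim_equal_return2num := by
  intro n _
  unfold Spec_return2num return2num return2num_alt
  by_cases hn : 0 < n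
  · obtain ⟨m, rfl⟩ : ∃ m : Nat, n = (m : Int) :=
      ⟨n.toNat, (Int.toNat_of_nonneg (le_of_lt hn)).symm⟩
    rw [fold1_fact, fold2_sum, bFact_eq]
    have hm : 0 < m := by exact_mod_cast hn
    have hfd : PySem.Int.floordiv ((m : Int) * ((m : Int) + 1)) 2
        = ((m * (m + 1) / 2 : Nat) : Int) := by
      rw [show (m : Int) * ((m : Int) + 1) = ((m * (m + 1) : Nat) : Int) by push_cast; ring]
      exact_mod_cast PySem.Int.floordiv_natCast (m * (m + 1)) 2
    rw [if_pos hn, hfd]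
    simp
  · have hnil : PySem.List.pyRange 0 n 1 = [] :=
      PySem.List.pyRange_one_eq_nil (by omega)
    rw [hnil, bFact_nonpos hn]
    simp [hn]
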